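-- pv_equiv track=rewrite | github.com/KikiSuho/ks-tools | packages/scrutiny/src/scrutiny/configs/pyproject.py | _iter_sections
-- ===== SOURCE A (Python) =====
-- from typing import TYPE_CHECKING, Any, Optional
--
-- def _iter_sections(
--     toml_text: str,
-- ) -> list[tuple[str, list[str]]]:
--     """
--     Split rendered TOML text into (header, body_lines) pairs.
--
--     Parameters
--     ----------
--     toml_text : str
--         TOML text with ``[tool.*]`` sections.
--
--     Returns
--     -------
--     list[tuple[str, list[str]]]
--         Each tuple is (section_header_line, list_of_body_lines).
--
--     """
--     sections: list[tuple[str, list[str]]] = []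
--     current_header: Optional[str] = None
--     current_body: list[str] = []
--
--     for line in toml_text.split("\n"):
--         stripped_line = line.strip()
--         # Start a new section when a [tool.*] header is encountered.
--         if stripped_line.startswith("[tool."):
--             if current_header is not None:
--                 sections.append((current_header, current_body))
--             current_header = stripped_line
--             current_body = []
--         # Accumulate non-blank body lines under the current header.
--         elif current_header is not None:
--             if stripped_line:
--                 current_body.append(line)
--
--     # Flush the last section.
--     if current_header is not None:
--         sections.append((current_header, current_body))
--
--     return sections
-- ===== SOURCE B (Python) =====
-- def _is_header(line):
--     return line.strip().startswith("[tool.")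
--
--
-- def _span_non_headers(lines):
--     """Longest prefix of non-header lines, and the remaining suffix."""
--     pre = []
--     k = 0
--     while k < len(lines) and not _is_header(lines[k]):
--         pre.append(lines[k])
--         k += 1
--     return pre, lines[k:]
--
--
-- def _go(lines):
--     if not lines:
--         return []
--     first, rest = lines[0], lines[1:]
--     if _is_header(first):
--         pre, suf = _span_non_headers(rest)
--         return [(first.strip(), [l for l in pre if l.strip()])] + _go(suf)
--     return _go(rest)
--
--
-- def _iter_sections(toml_text):
--     return _go(toml_text.split("\n"))
-- ===== Notes on version B (the rewrite author's own statement) =====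
-- stated objective: simpler
-- what changed: Replaced A's stateful single pass (current_header/current_body accumulators with an end-of-loop flush) by stateless recursion over header-delimited spans: skip to the first [tool. header, take the span of following non-header lines (filtered non-blank) as its body, and recurse on the remainder.
import Mathlib
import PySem

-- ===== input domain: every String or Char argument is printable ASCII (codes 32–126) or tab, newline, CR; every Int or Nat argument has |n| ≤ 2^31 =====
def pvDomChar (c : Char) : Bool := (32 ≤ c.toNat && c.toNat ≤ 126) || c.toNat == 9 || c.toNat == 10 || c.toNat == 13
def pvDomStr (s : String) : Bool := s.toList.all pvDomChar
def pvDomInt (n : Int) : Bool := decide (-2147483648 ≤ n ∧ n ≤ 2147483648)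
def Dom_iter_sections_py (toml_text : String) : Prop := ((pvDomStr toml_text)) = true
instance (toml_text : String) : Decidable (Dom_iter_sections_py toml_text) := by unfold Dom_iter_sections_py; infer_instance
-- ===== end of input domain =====

-- B replaces A's running current_header/current_body accumulator with stateless recursion over
-- header-delimited spans of the line list (objective: simpler; same value everywhere).

-- ===== PORT A =====
-- the for-loop of A, state = (current_header, current_body, sections); the [] cases are the final flush
def pvLoopA : List String → Option String → List String → List (String × List String) → List (String × List String)
  | [], none, _, secs => secs
  | [], some h, body, secs => secs ++ [(h, body)]
  | line :: rest, hdr?, body, secs =>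
    let s := PySem.Str.strip line
    if PySem.Str.startswith s "[tool." then
      match hdr? with
      | none => pvLoopA rest (some s) [] secs
      | some h => pvLoopA rest (some s) [] (secs ++ [(h, body)])
    else
      match hdr? with
      | some h => if s ≠ "" then pvLoopA rest (some h) (body ++ [line]) secs
                  else pvLoopA rest (some h) body secs
      | none => pvLoopA rest none body secs

def iter_sections_py (toml_text : String) : List (String × List String) :=
  pvLoopA ((PySem.Str.split? toml_text "\n").getD []) none [] []   -- "\n" ≠ "", so split? is always some

-- ===== PORT B =====
def pvIsHdr (line : String) : Bool := PySem.Str.startswith (PySem.Str.strip line) "[tool."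

-- the k-scan of _span_non_headers: longest non-header prefix, and the remaining suffix
def pvSpanNH : List String → List String × List String
  | [] => ([], [])
  | l :: rest =>
    if pvIsHdr l then ([], l :: rest)
    else ((pvSpanNH rest).1.cons l, (pvSpanNH rest).2)

theorem pvSpanNH_snd_len (ls : List String) : (pvSpanNH ls).2.length ≤ ls.length := by
  induction ls with
  | nil => simp [pvSpanNH]
  | cons l rest ih =>
    simp only [pvSpanNH]
    split
    · simp
    · simpa using Nat.le_succ_of_le ih

def pvGo : List String → List (String × List String)
  | [] => []
  | first :: rest =>
    if pvIsHdr first then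
      [(PySem.Str.strip first,
        (pvSpanNH rest).1.filter (fun l => decide (PySem.Str.strip l ≠ "")))] ++ pvGo (pvSpanNH rest).2
    else pvGo rest
termination_by ls => ls.length
decreasing_by
  · exact Nat.lt_succ_of_le (pvSpanNH_snd_len rest)
  · simp

def iter_sections_py_alt (toml_text : String) : List (String × List String) :=
  pvGo ((PySem.Str.split? toml_text "\n").getD [])

-- ===== PRECONDITION & SPEC =====
def Spec_iter_sections_py (toml_text : String) (out : List (String × List String)) : Prop := out = iter_sections_py_alt toml_text
instance (toml_text : String) (out : List (String × List String)) : Decidable (Spec_iter_sections_py toml_text out) := by unfold Spec_iter_sections_py; infer_instance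

-- ===== CLAIM (what is proved, stated in full; the proofs are below) =====
def Claim_equal_iter_sections_py : Prop := ∀ (toml_text : String), Dom_iter_sections_py toml_text → Spec_iter_sections_py toml_text (iter_sections_py toml_text)

-- ===== LEMMAS AND PROOFS =====

-- with a current header h, the loop finishes h's section from the non-header span, then behaves like pvGo
theorem pvLoopA_some (ls : List String) : ∀ (h : String) (body : List String) (secs : List (String × List String)),
    pvLoopA ls (some h) body secs =
      secs ++ [(h, body ++ (pvSpanNH ls).1.filter (fun l => decide (PySem.Str.strip l ≠ "")))] ++ pvGo (pvSpanNH ls).2 := by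
  induction ls with
  | nil => intro h body secs; simp [pvLoopA, pvSpanNH, pvGo]
  | cons line rest ih =>
    intro h body secs
    by_cases hh : pvIsHdr line = true
    · have hh' : PySem.Str.startswith (PySem.Str.strip line) "[tool." = true := hh
      rw [pvLoopA, pvSpanNH]
      simp only [hh', hh, if_true, ih, pvGo]
      simp
    · have hh' : PySem.Str.startswith (PySem.Str.strip line) "[tool." = false :=
        Bool.eq_false_iff.mpr hh
      by_cases hs : PySem.Str.strip line = ""
      · have hws : PySem.Str.startswith "" "[tool." = false := by decide
        rw [pvLoopA, pvSpanNH]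
        simp only [hs, hws, Bool.false_eq_true, if_false, hh, ih]
        simp [hs]
      · rw [pvLoopA, pvSpanNH]
        simp only [hh', hh, if_false, Bool.false_eq_true]
        rw [if_pos hs, ih]
        simp [hs]

-- with no current header yet, the loop is pvGo (the preamble lines are dropped)
theorem pvLoopA_none (ls : List String) : ∀ (body : List String) (secs : List (String × List String)),
    pvLoopA ls none body secs = secs ++ pvGo ls := by
  induction ls with
  | nil => intro body secs; simp [pvLoopA, pvGo]
  | cons line rest ih =>
    intro body secs
    by_cases hh : pvIsHdr line = true
    · have hh' : PySem.Str.startswith (PySem.Str.strip line) "[tool." = true := hh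
      rw [pvLoopA, pvGo]
      simp only [hh', hh, if_true]
      rw [pvLoopA_some]
      simp
    · have hh' : PySem.Str.startswith (PySem.Str.strip line) "[tool." = false :=
        Bool.eq_false_iff.mpr hh
      rw [pvLoopA, pvGo]
      simp only [hh', hh, if_false, Bool.false_eq_true, ih]

-- ===== VERDICT (by name: the statement is the Claim_ definition above) =====
theorem iter_sections_py_spec : Claim_equal_iter_sections_py := by
  intro t _
  show iter_sections_py t = iter_sections_py_alt t
  unfold iter_sections_py iter_sections_py_alt
  rw [pvLoopA_none]
  simp
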